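-- pv_equiv track=rewrite | github.com/dntaylor/DevTools | Plotter/python/higgsUtilities.py | getChannelLabels
-- ===== SOURCE A (Python) =====
-- from itertools import product, combinations_with_replacement
--
-- def getChannels(analysis):
--     '''Get channel strings for analysis'''
--     chans = {}
--     hppChannels = [''.join(x) for x in product('emt',repeat=2)]
--     hmChannels  = [''.join(x) for x in product('emt',repeat=1)]
--     if analysis=='Hpp4l':
--         for hpp in hppChannels:
--             for hmm in hppChannels:
--                 chanString = ''.join(sorted(hpp))+''.join(sorted(hmm))
--                 if chanString not in chans:
--                     chans[chanString] = []
--                 chans[chanString] += [hpp+hmm]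
--     elif analysis=='Hpp3l':
--         for hpp in hppChannels:
--             for hm in hmChannels:
--                 chanString = ''.join(sorted(hpp))+''.join(sorted(hm))
--                 if chanString not in chans:
--                     chans[chanString] = []
--                 chans[chanString] += [hpp+hm]
--     return chans
--
-- def getChannelLabels(analysis):
--     '''Get channel labels'''
--     labelMap = {
--         'e': 'e',
--         'm': '#mu',
--         't': '#tau',
--     }
--     chanLabels = [''.join([labelMap[c] for c in chan]) for chan in sorted(getChannels(analysis).keys())]
--     return chanLabels
-- ===== SOURCE B (Python) =====
-- from itertools import combinations_with_replacement
--
-- def getChannelLabels(analysis):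
--     '''Get channel labels'''
--     labelMap = {'e': 'e', 'm': '#mu', 't': '#tau'}
--     pairs = [''.join(p) for p in combinations_with_replacement('emt', 2)]
--     if analysis == 'Hpp4l':
--         keys = [a + b for a in pairs for b in pairs]
--     elif analysis == 'Hpp3l':
--         keys = [a + b for a in pairs for b in 'emt']
--     else:
--         keys = []
--     return [''.join(labelMap[c] for c in k) for k in sorted(keys)]
-- ===== Notes on version B (the rewrite author's own statement) =====
-- stated objective: simpler
-- what changed: B inlines getChannels and generates the distinct sorted channel keys directly with combinations_with_replacement, eliminating the nested product loops and the dict-based deduplication that A only uses to collect keys.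
import Mathlib
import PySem

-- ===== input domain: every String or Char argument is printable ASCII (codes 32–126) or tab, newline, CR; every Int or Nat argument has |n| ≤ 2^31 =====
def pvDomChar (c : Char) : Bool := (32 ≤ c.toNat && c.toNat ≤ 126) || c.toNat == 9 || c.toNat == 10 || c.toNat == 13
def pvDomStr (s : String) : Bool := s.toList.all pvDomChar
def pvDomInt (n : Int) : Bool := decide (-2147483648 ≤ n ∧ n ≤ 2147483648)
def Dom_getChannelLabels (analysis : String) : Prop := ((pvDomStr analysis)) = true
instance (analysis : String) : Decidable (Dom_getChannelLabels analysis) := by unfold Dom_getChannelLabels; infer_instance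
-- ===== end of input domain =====

-- B inlines getChannels and builds the distinct sorted channel keys directly with
-- combinations_with_replacement, skipping A's dict-based dedup; objective: simpler, same result.

-- ===== PORT A =====
-- channel strings are kept as List Char (''.join of chars); the final labels become String
def pvLettersA : List Char := ['e', 'm', 't']

-- [''.join(x) for x in product('emt', repeat=2)]
def pvHppChannels : List (List Char) :=
  pvLettersA.flatMap (fun a => pvLettersA.map (fun b => [a, b]))

-- [''.join(x) for x in product('emt', repeat=1)]
def pvHmChannels : List (List Char) := pvLettersA.map (fun a => [a])

-- labelMap; Python's labelMap[c] raises KeyError only for chars other than 'e','m','t',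
-- which never occur in the channel keys, so the `.getD []` default is unreachable.
def pvLabelMapA : PySem.Dict Char (List Char) :=
  PySem.Dict.ofList [('e', ['e']), ('m', ['#', 'm', 'u']), ('t', ['#', 't', 'a', 'u'])]

-- getChannels(analysis): dict build, transliterated loop for loop
def pvGetChannels (analysis : String) : PySem.Dict (List Char) (List (List Char)) :=
  if analysis == "Hpp4l" then
    pvHppChannels.foldl (fun d hpp =>
      pvHppChannels.foldl (fun d hmm =>
        let chanString := PySem.List.sorted hpp (fun x => x) false ++ PySem.List.sorted hmm (fun x => x) false
        let d := if d.contains chanString then d else d.insert chanString []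
        d.modify chanString [] (fun v => v ++ [hpp ++ hmm])) d) PySem.Dict.empty
  else if analysis == "Hpp3l" then
    pvHppChannels.foldl (fun d hpp =>
      pvHmChannels.foldl (fun d hm =>
        let chanString := PySem.List.sorted hpp (fun x => x) false ++ PySem.List.sorted hm (fun x => x) false
        let d := if d.contains chanString then d else d.insert chanString []
        d.modify chanString [] (fun v => v ++ [hpp ++ hm])) d) PySem.Dict.empty
  else PySem.Dict.empty

def getChannelLabels (analysis : String) : List String :=
  (PySem.List.sorted (pvGetChannels analysis).keys (fun x => x) false).map
    (fun chan => String.ofList ((chan.map (fun c => (pvLabelMapA.get? c).getD [])).flatten))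

-- ===== PORT B =====
def pvLabelMapB : PySem.Dict Char (List Char) :=
  PySem.Dict.ofList [('e', ['e']), ('m', ['#', 'm', 'u']), ('t', ['#', 't', 'a', 'u'])]

-- [''.join(p) for p in combinations_with_replacement('emt', 2)]
def pvPairsB : List (List Char) :=
  (List.range 3).flatMap (fun i =>
    ((['e', 'm', 't'] : List Char).drop i).map (fun b => [(['e', 'm', 't'] : List Char).getD i ' ', b]))

def getChannelLabels_alt (analysis : String) : List String :=
  let keys : List (List Char) :=
    if analysis == "Hpp4l" then
      pvPairsB.flatMap (fun a => pvPairsB.map (fun b => a ++ b))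
    else if analysis == "Hpp3l" then
      pvPairsB.flatMap (fun a => (['e', 'm', 't'] : List Char).map (fun b => a ++ [b]))
    else []
  (PySem.List.sorted keys (fun x => x) false).map
    (fun k => String.ofList ((k.map (fun c => (pvLabelMapB.get? c).getD [])).flatten))

-- ===== PRECONDITION & SPEC =====
def Spec_getChannelLabels (analysis : String) (out : List String) : Prop := out = getChannelLabels_alt analysis
instance (analysis : String) (out : List String) : Decidable (Spec_getChannelLabels analysis out) := by unfold Spec_getChannelLabels; infer_instance

-- ===== CLAIM (what is proved, stated in full; the proofs are below) =====
def Claim_equal_getChannelLabels : Prop := ∀ (analysis : String), Dom_getChannelLabels analysis → Spec_getChannelLabels analysis (getChannelLabels analysis)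

-- ===== LEMMAS AND PROOFS =====
set_option maxHeartbeats 4000000 in
set_option maxRecDepth 10000 in
theorem pv_eq_Hpp4l : getChannelLabels "Hpp4l" = getChannelLabels_alt "Hpp4l" := by decide

set_option maxHeartbeats 4000000 in
set_option maxRecDepth 10000 in
theorem pv_eq_Hpp3l : getChannelLabels "Hpp3l" = getChannelLabels_alt "Hpp3l" := by decide

theorem pv_eq_other (analysis : String) (h4 : analysis ≠ "Hpp4l") (h3 : analysis ≠ "Hpp3l") :
    getChannelLabels analysis = getChannelLabels_alt analysis := by
  simp [getChannelLabels, getChannelLabels_alt, pvGetChannels, h4, h3,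
    PySem.Dict.empty, PySem.Dict.keys, PySem.List.sorted]

-- ===== VERDICT (by name: the statement is the Claim_ definition above) =====
theorem getChannelLabels_spec : Claim_equal_getChannelLabels := by
  intro analysis _
  unfold Spec_getChannelLabels
  by_cases h4 : analysis = "Hpp4l"
  · subst h4; exact pv_eq_Hpp4l
  · by_cases h3 : analysis = "Hpp3l"
    · subst h3; exact pv_eq_Hpp3l
    · exact pv_eq_other analysis h4 h3
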